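-- pv_equiv track=rewrite | github.com/zhaofeng-shu33/tech-chores-archive | 2022/kmp.py | kmp_matcher_modified
-- ===== SOURCE A (Python) =====
-- def compute_prefix_function(p):
--     m = len(p)
--     _pi = [0] * m
--     k = 0
--     for q in range(1, m):
--         while k > 0 and p[k] != p[q]:
--             k = _pi[k-1]
--         if p[k] == p[q]:
--             k += 1
--         _pi[q] = k
--     return _pi
--
-- def kmp_matcher_modified(T, P):
--     n = len(T)
--     m = len(P)
--     _pi = compute_prefix_function(P)
--     q = 0
--     _max_repeat_time = 2 + int(m / n)
--     for _i in range(_max_repeat_time):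
--         for i in range(n):
--             while q > 0 and P[q] != T[i]:
--                 q = _pi[q-1]
--             if P[q] == T[i]:
--                 q += 1
--             if q == m:
--                 return _i + 1
--     return -1
-- ===== SOURCE B (Python) =====
-- def kmp_matcher_modified(T, P):
--     n = len(T)
--     m = len(P)
--     repeat = 2 + int(m / n)
--     S = T * repeat
--     for e in range(m - 1, repeat * n):
--         if S[e - m + 1 : e + 1] == P:
--             return e // n + 1
--     return -1
-- ===== Notes on version B (the rewrite author's own statement) =====
-- stated objective: simpler
-- what changed: Replaces KMP (prefix-function table plus failure-link matching over repeated copies) with a direct naive scan of S = T * repeat, trying each possible match end position and comparing a slice against P.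
import Mathlib
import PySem

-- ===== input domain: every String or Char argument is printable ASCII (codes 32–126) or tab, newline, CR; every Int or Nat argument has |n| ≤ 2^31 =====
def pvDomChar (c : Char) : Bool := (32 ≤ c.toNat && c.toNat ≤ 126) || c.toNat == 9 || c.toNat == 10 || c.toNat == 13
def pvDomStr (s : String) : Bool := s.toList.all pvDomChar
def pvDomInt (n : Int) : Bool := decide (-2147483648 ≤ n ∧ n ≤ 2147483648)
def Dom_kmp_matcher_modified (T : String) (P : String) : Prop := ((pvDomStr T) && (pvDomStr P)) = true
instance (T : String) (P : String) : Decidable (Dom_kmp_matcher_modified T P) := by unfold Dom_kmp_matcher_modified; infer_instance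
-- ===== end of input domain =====

-- B replaces A's KMP machinery (prefix table + failure links) with a plain naive scan
-- of S = T * repeat that tries each match end position: simpler, not faster.

-- ===== PORT A =====
-- The Python loop counters k, q and the _pi entries are provably nonnegative and in
-- range on every admitted input, so they are carried as Nat; reads use getD, which is
-- exact here (no admitted input reaches the default), and the `if h : k' < k` guard
-- only makes the while-loop total: _pi[k-1] < k always holds.

-- while k > 0 and p[k] != c: k = _pi[k-1]
def pvWhileA (p : List Char) (piL : List Nat) (c : Char) (k : Nat) : Nat :=
  if k = 0 then k
  else if p.getD k ' ' ≠ c then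
    (if _h : piL.getD (k - 1) 0 < k then pvWhileA p piL c (piL.getD (k - 1) 0)
     else piL.getD (k - 1) 0)
  else k
termination_by k

-- one iteration of the `for q in range(1, m)` loop; state = (_pi, k)
def pvCpfStep (p : List Char) (st : List Nat × Nat) (q : Nat) : List Nat × Nat :=
  let k1 := pvWhileA p st.1 (p.getD q ' ') st.2
  let k2 := if p.getD k1 ' ' = p.getD q ' ' then k1 + 1 else k1
  (st.1.set q k2, k2)

def compute_prefix_function (p : List Char) : List Nat :=
  ((List.range' 1 (p.length - 1)).foldl (pvCpfStep p) (List.replicate p.length 0, 0)).1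

-- one iteration of the inner `for i in range(n)` loop; .inl = already returned
def pvKmpStep (p : List Char) (piL : List Nat) (copy : Nat) (st : Sum Int Nat) (c : Char) :
    Sum Int Nat :=
  match st with
  | .inl r => .inl r
  | .inr q =>
    let q1 := pvWhileA p piL c q
    let q2 := if p.getD q1 ' ' = c then q1 + 1 else q1
    if q2 = p.length then .inl ((copy + 1 : Nat) : Int) else .inr q2

def kmp_matcher_modified (T : String) (P : String) : Int :=
  let t := T.toList
  let p := P.toList
  let piL := compute_prefix_function p
  -- _max_repeat_time = 2 + int(m / n)  (n > 0 under Pre_, where int(m/n) = m // n)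
  match (List.range (2 + p.length / t.length)).foldl
      (fun st copy => t.foldl (pvKmpStep p piL copy) st) (Sum.inr 0) with
  | .inl r => r
  | .inr _ => -1

-- ===== PORT B =====
-- for e in range(m - 1, repeat * n): if S[e - m + 1 : e + 1] == P: return e // n + 1
def pvScanB (s p : List Char) (n : Nat) : List Nat → Int
  | [] => -1
  | e :: es =>
    if (s.drop (e + 1 - p.length)).take p.length = p then ((e / n : Nat) : Int) + 1
    else pvScanB s p n es

def kmp_matcher_modified_alt (T : String) (P : String) : Int :=
  let t := T.toList
  let p := P.toList
  let n := t.length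
  let m := p.length
  let rep := 2 + m / n
  let s := (List.replicate rep t).flatten
  pvScanB s p n (List.range' (m - 1) (rep * n - (m - 1)))

-- ===== PRECONDITION & SPEC =====
-- Pre_ excludes exactly the inputs on which A raises: empty T (ZeroDivisionError in
-- 2 + int(m / n)) and empty P (IndexError on P[q] with q = 0).
def Pre_kmp_matcher_modified (T : String) (P : String) : Prop :=
  T.toList ≠ [] ∧ P.toList ≠ []
instance (T : String) (P : String) : Decidable (Pre_kmp_matcher_modified T P) := by
  unfold Pre_kmp_matcher_modified; infer_instance

def pvWitness_kmp_matcher_modified : String × String := ("ab", "b")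

def Spec_kmp_matcher_modified (T : String) (P : String) (out : Int) : Prop :=
  out = kmp_matcher_modified_alt T P
instance (T : String) (P : String) (out : Int) : Decidable (Spec_kmp_matcher_modified T P out) := by
  unfold Spec_kmp_matcher_modified; infer_instance

-- ===== CLAIM (what is proved, stated in full; the proofs are below) =====
def Claim_equal_kmp_matcher_modified : Prop := ∀ (T : String) (P : String),
  Dom_kmp_matcher_modified T P → Pre_kmp_matcher_modified T P →
  Spec_kmp_matcher_modified T P (kmp_matcher_modified T P)

-- ===== LEMMAS AND PROOFS =====

-- longest k ≤ |p| with p.take k a suffix of w (the KMP automaton state after reading w)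
def pvLbp (p w : List Char) : Nat :=
  Nat.findGreatest (fun k => p.take k <:+ w) p.length

-- longest PROPER border of p.take l (the prefix-function value _pi[l-1])
def pvLbf (p : List Char) (l : Nat) : Nat :=
  Nat.findGreatest (fun k => k < l ∧ p.take k <:+ p.take l) l

lemma pv_take_succ (p : List Char) (k : Nat) (h : k < p.length) :
    p.take (k + 1) = p.take k ++ [p.getD k ' '] := by
  rw [List.take_succ_eq_append_getElem h, List.getD_eq_getElem?_getD]
  simp [h]

lemma pv_suffix_of_suffix (a b c : List Char) (ha : a <:+ c) (hb : b <:+ c)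
    (hl : a.length ≤ b.length) : a <:+ b := by
  rw [← List.reverse_prefix] at *
  exact List.prefix_of_prefix_length_le ha hb (by simpa using hl)

lemma pv_snoc_suffix (x y : Char) (a b : List Char) :
    a ++ [x] <:+ b ++ [y] ↔ a <:+ b ∧ x = y := by
  rw [← List.reverse_prefix]; simp [List.cons_prefix_cons, and_comm]

lemma pv_suffix_iff_drop (u v : List Char) (h : u.length ≤ v.length) :
    u <:+ v ↔ v.drop (v.length - u.length) = u := by
  constructor
  · rintro ⟨t, rfl⟩
    have : (t ++ u).length - u.length = t.length := by simp
    rw [this, List.drop_left]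
  · intro he; rw [← he]; exact List.drop_suffix _ _

lemma pv_lbp_le (p w : List Char) : pvLbp p w ≤ p.length := Nat.findGreatest_le _

lemma pv_lbp_suffix (p w : List Char) : p.take (pvLbp p w) <:+ w := by
  rcases Nat.eq_zero_or_pos (pvLbp p w) with h | h
  · simp [h]
  · exact (Nat.findGreatest_eq_iff.mp (rfl : pvLbp p w = _)).2.1 h.ne'

lemma pv_le_lbp (p w : List Char) (k : Nat) (hk : k ≤ p.length) (hs : p.take k <:+ w) :
    k ≤ pvLbp p w := Nat.le_findGreatest hk hs

lemma pv_lbp_eq_len_iff (p w : List Char) (hp : p ≠ []) :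
    pvLbp p w = p.length ↔ p <:+ w := by
  constructor
  · intro h
    have := pv_lbp_suffix p w
    rwa [h, List.take_length] at this
  · intro h
    have h1 : p.length ≤ pvLbp p w := pv_le_lbp p w p.length le_rfl (by simpa using h)
    exact le_antisymm (pv_lbp_le p w) h1

lemma pv_lbp_nil (p : List Char) (hp : p ≠ []) : pvLbp p [] = 0 := by
  rcases Nat.eq_zero_or_pos (pvLbp p []) with h | h
  · exact h
  · exfalso
    have hs := pv_lbp_suffix p []
    have : p.take (pvLbp p []) = [] := List.suffix_nil.mp hs
    have hlen : p.take (pvLbp p []) ≠ [] := by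
      apply List.ne_nil_of_length_pos
      rw [List.length_take]
      have := pv_lbp_le p []
      have : 0 < p.length := List.length_pos_of_ne_nil hp
      omega
    exact hlen ‹_›

lemma pv_lbf_lt (p : List Char) (l : Nat) (hl : 0 < l) : pvLbf p l < l := by
  rcases Nat.eq_zero_or_pos (pvLbf p l) with h | h
  · omega
  · exact ((Nat.findGreatest_eq_iff.mp (rfl : pvLbf p l = _)).2.1 h.ne').1

lemma pv_lbf_suffix (p : List Char) (l : Nat) : p.take (pvLbf p l) <:+ p.take l := by
  rcases Nat.eq_zero_or_pos (pvLbf p l) with h | h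
  · simp [h]
  · exact ((Nat.findGreatest_eq_iff.mp (rfl : pvLbf p l = _)).2.1 h.ne').2

lemma pv_le_lbf (p : List Char) (l k : Nat) (hk : k < l) (hs : p.take k <:+ p.take l) :
    k ≤ pvLbf p l := Nat.le_findGreatest (le_of_lt hk) ⟨hk, hs⟩

lemma pv_lbf_one (p : List Char) : pvLbf p 1 = 0 := by
  unfold pvLbf
  rw [Nat.findGreatest_succ]
  simp

-- correctness of the ported while-loop, by strong induction on k
lemma pvWhileA_correct (p : List Char) (piL : List Nat) (c : Char) :
    ∀ k, k < p.length → ∀ w, p.take k <:+ w →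
    (∀ j, j < k → piL.getD j 0 = pvLbf p (j + 1)) →
    (pvWhileA p piL c k ≤ k ∧ p.take (pvWhileA p piL c k) <:+ w ∧
     (pvWhileA p piL c k = 0 ∨ p.getD (pvWhileA p piL c k) ' ' = c) ∧
     ∀ j, j ≤ k → p.take j <:+ w → p.getD j ' ' = c → j ≤ pvWhileA p piL c k) := by
  intro k
  induction k using Nat.strong_induction_on with
  | _ k ih =>
    intro hk w hsuf Hpi
    by_cases h0 : k = 0
    · subst h0
      rw [pvWhileA, if_pos rfl]
      exact ⟨le_rfl, hsuf, Or.inl rfl, fun j hj _ _ => hj⟩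
    · by_cases hc : p.getD k ' ' = c
      · have hcc : ¬ (p.getD k ' ' ≠ c) := not_not_intro hc
        rw [pvWhileA]
        rw [if_neg h0, if_neg hcc]
        exact ⟨le_rfl, hsuf, Or.inr hc, fun j hj _ _ => hj⟩
      · have hkpos : 0 < k := Nat.pos_of_ne_zero h0
        have hpi0 : piL.getD (k - 1) 0 = pvLbf p k := by
          have := Hpi (k - 1) (by omega)
          rwa [Nat.sub_add_cancel hkpos] at this
        have hk'lt : piL.getD (k - 1) 0 < k := by
          rw [hpi0]; exact pv_lbf_lt p k hkpos
        have hstep : pvWhileA p piL c k = pvWhileA p piL c (piL.getD (k - 1) 0) := by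
          rw [pvWhileA]
          simp only [if_neg h0, ne_eq, hc, not_false_eq_true, if_true, dif_pos hk'lt]
        have hsuf' : p.take (piL.getD (k - 1) 0) <:+ w := by
          rw [hpi0]; exact (pv_lbf_suffix p k).trans hsuf
        obtain ⟨ih1, ih2, ih3, ih4⟩ :=
          ih (piL.getD (k - 1) 0) hk'lt (lt_trans hk'lt hk) w hsuf'
            (fun j hj => Hpi j (lt_trans hj hk'lt))
        rw [hstep]
        refine ⟨le_of_lt (lt_of_le_of_lt ih1 hk'lt), ih2, ih3, ?_⟩
        intro j hj hjs hjc
        have hjk : j < k := by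
          rcases Nat.lt_or_ge j k with h | h
          · exact h
          · exfalso; exact hc (by have : j = k := le_antisymm hj h; rwa [this] at hjc)
        have hjlbf : j ≤ pvLbf p k := by
          apply pv_le_lbf p k j hjk
          apply pv_suffix_of_suffix _ _ w hjs hsuf
          simp only [List.length_take]
          omega
        exact ih4 j (hpi0 ▸ hjlbf) hjs hjc

-- one matcher step computes the automaton transition: lbp of w ++ [c]
lemma pvStep_lbp (p : List Char) (piL : List Nat) (c : Char) (w : List Char) (q : Nat)
    (hq : q = pvLbp p w) (hqm : q < p.length)
    (Hpi : ∀ j, j < p.length → piL.getD j 0 = pvLbf p (j + 1)) :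
    (if p.getD (pvWhileA p piL c q) ' ' = c then pvWhileA p piL c q + 1
     else pvWhileA p piL c q) = pvLbp p (w ++ [c]) := by
  have hm : 0 < p.length := lt_of_le_of_lt (Nat.zero_le q) hqm
  obtain ⟨hr1, hr2, hr3, hr4⟩ :=
    pvWhileA_correct p piL c q hqm w (hq ▸ pv_lbp_suffix p w)
      (fun j hj => Hpi j (lt_trans hj hqm))
  set r := pvWhileA p piL c q with hrdef
  have hrm : r < p.length := lt_of_le_of_lt hr1 hqm
  -- the high side: every border of w ++ [c] is ≤ r + 1
  have hub : ∀ hL : 0 < pvLbp p (w ++ [c]),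
      pvLbp p (w ++ [c]) - 1 ≤ q ∧ p.take (pvLbp p (w ++ [c]) - 1) <:+ w ∧
        p.getD (pvLbp p (w ++ [c]) - 1) ' ' = c := by
    intro hL
    set L := pvLbp p (w ++ [c]) with hLdef
    have hLle : L ≤ p.length := pv_lbp_le p (w ++ [c])
    have hLs : p.take L <:+ w ++ [c] := pv_lbp_suffix p (w ++ [c])
    have hL1 : L - 1 < p.length := by omega
    have : p.take (L - 1) ++ [p.getD (L - 1) ' '] <:+ w ++ [c] := by
      rw [← pv_take_succ p (L - 1) hL1, Nat.sub_add_cancel hL]; exact hLs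
    obtain ⟨hs, hcc⟩ := (pv_snoc_suffix _ _ _ _).mp this
    refine ⟨?_, hs, hcc⟩
    rw [hq]
    exact pv_le_lbp p w (L - 1) (by omega) hs
  by_cases hc : p.getD r ' ' = c
  · rw [if_pos hc]
    apply le_antisymm
    · apply pv_le_lbp p (w ++ [c]) (r + 1) (by omega)
      rw [pv_take_succ p r hrm, hc]
      exact (pv_snoc_suffix _ _ _ _).mpr ⟨hr2, rfl⟩
    · rcases Nat.eq_zero_or_pos (pvLbp p (w ++ [c])) with h | h
      · omega
      · obtain ⟨h1, h2, h3⟩ := hub h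
        have := hr4 _ h1 h2 h3
        omega
  · rw [if_neg hc]
    have hr0 : r = 0 := hr3.resolve_right hc
    rcases Nat.eq_zero_or_pos (pvLbp p (w ++ [c])) with h | h
    · omega
    · exfalso
      obtain ⟨h1, h2, h3⟩ := hub h
      have := hr4 _ h1 h2 h3
      have : pvLbp p (w ++ [c]) - 1 = 0 := by omega
      rw [this] at h3
      rw [hr0] at hc
      exact hc h3

-- one prefix-function step computes the next proper border
lemma pvStep_lbf (p : List Char) (piL : List Nat) (q : Nat) (hq1 : 1 ≤ q) (hqm : q < p.length)
    (Hpi : ∀ j, j < q → piL.getD j 0 = pvLbf p (j + 1)) :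
    (if p.getD (pvWhileA p piL (p.getD q ' ') (pvLbf p q)) ' ' = p.getD q ' '
     then pvWhileA p piL (p.getD q ' ') (pvLbf p q) + 1
     else pvWhileA p piL (p.getD q ' ') (pvLbf p q)) = pvLbf p (q + 1) := by
  have hm : 0 < p.length := lt_of_le_of_lt (Nat.zero_le q) hqm
  have hklt : pvLbf p q < q := pv_lbf_lt p q hq1
  have hkm : pvLbf p q < p.length := lt_trans hklt hqm
  obtain ⟨hr1, hr2, hr3, hr4⟩ :=
    pvWhileA_correct p piL (p.getD q ' ') (pvLbf p q) hkm (p.take q) (pv_lbf_suffix p q)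
      (fun j hj => Hpi j (lt_trans hj hklt))
  set c := p.getD q ' ' with hcdef
  set r := pvWhileA p piL c (pvLbf p q) with hrdef
  have hrm : r < p.length := lt_of_le_of_lt hr1 hkm
  have htq : p.take (q + 1) = p.take q ++ [c] := pv_take_succ p q hqm
  have hub : ∀ hL : 0 < pvLbf p (q + 1),
      pvLbf p (q + 1) - 1 ≤ pvLbf p q ∧ p.take (pvLbf p (q + 1) - 1) <:+ p.take q ∧
        p.getD (pvLbf p (q + 1) - 1) ' ' = c := by
    intro hL
    set L := pvLbf p (q + 1) with hLdef
    have hLlt : L < q + 1 := pv_lbf_lt p (q + 1) (by omega)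
    have hLs : p.take L <:+ p.take (q + 1) := pv_lbf_suffix p (q + 1)
    have hL1 : L - 1 < p.length := by omega
    have : p.take (L - 1) ++ [p.getD (L - 1) ' '] <:+ p.take q ++ [c] := by
      rw [← pv_take_succ p (L - 1) hL1, Nat.sub_add_cancel hL, ← htq]; exact hLs
    obtain ⟨hs, hcc⟩ := (pv_snoc_suffix _ _ _ _).mp this
    exact ⟨pv_le_lbf p q (L - 1) (by omega) hs, hs, hcc⟩
  by_cases hc : p.getD r ' ' = c
  · rw [if_pos hc]
    apply le_antisymm
    · apply pv_le_lbf p (q + 1) (r + 1) (by omega)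
      rw [pv_take_succ p r hrm, hc, htq]
      exact (pv_snoc_suffix _ _ _ _).mpr ⟨hr2, rfl⟩
    · rcases Nat.eq_zero_or_pos (pvLbf p (q + 1)) with h | h
      · omega
      · obtain ⟨h1, h2, h3⟩ := hub h
        have := hr4 _ h1 h2 h3
        omega
  · rw [if_neg hc]
    have hr0 : r = 0 := hr3.resolve_right hc
    rcases Nat.eq_zero_or_pos (pvLbf p (q + 1)) with h | h
    · omega
    · exfalso
      obtain ⟨h1, h2, h3⟩ := hub h
      have := hr4 _ h1 h2 h3
      have hz : pvLbf p (q + 1) - 1 = 0 := by omega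
      rw [hz] at h3
      rw [hr0] at hc
      exact hc h3

lemma pv_cpf_inv (p : List Char) : ∀ j, j ≤ p.length - 1 →
    (((List.range' 1 j).foldl (pvCpfStep p) (List.replicate p.length 0, 0)).1.length = p.length ∧
     ((List.range' 1 j).foldl (pvCpfStep p) (List.replicate p.length 0, 0)).2 = pvLbf p (j + 1) ∧
     ∀ i, i ≤ j →
       ((List.range' 1 j).foldl (pvCpfStep p) (List.replicate p.length 0, 0)).1.getD i 0 =
         pvLbf p (i + 1)) := by
  intro j
  induction j with
  | zero =>
    intro _
    refine ⟨by simp, (pv_lbf_one p).symm, ?_⟩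
    intro i hi
    interval_cases i
    rcases Nat.eq_zero_or_pos p.length with h | h
    · simp [h, pv_lbf_one]
    · simp [List.getD_eq_getElem?_getD, List.getElem?_replicate, h, pv_lbf_one]
  | succ j ihj =>
    intro hj
    have hj' : j ≤ p.length - 1 := by omega
    obtain ⟨ih1, ih2, ih3⟩ := ihj hj'
    have hq1 : 1 ≤ j + 1 := by omega
    have hqm : j + 1 < p.length := by omega
    rw [List.range'_1_concat, List.foldl_append]
    set st := (List.range' 1 j).foldl (pvCpfStep p) (List.replicate p.length 0, 0) with hst
    simp only [List.foldl_cons, List.foldl_nil]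
    have hq : (1 + j) = j + 1 := by omega
    rw [hq]
    have hk2 : (pvCpfStep p st (j + 1)).2 = pvLbf p (j + 1 + 1) := by
      show (if _ then _ else _) = _
      rw [show st.2 = pvLbf p (j + 1) from ih2]
      exact pvStep_lbf p st.1 (j + 1) hq1 hqm (fun i hi => ih3 i (by omega))
    refine ⟨by simp [pvCpfStep, ih1], hk2, ?_⟩
    intro i hi
    rcases Nat.lt_or_ge i (j + 1) with hlt | hge
    · show (st.1.set (j + 1) _).getD i 0 = _
      rw [List.getD_eq_getElem?_getD, List.getElem?_set_ne (by omega), ← List.getD_eq_getElem?_getD]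
      exact ih3 i (by omega)
    · have hieq : i = j + 1 := by omega
      rw [hieq]
      show (st.1.set (j + 1) _).getD (j + 1) 0 = _
      rw [List.getD_eq_getElem?_getD, List.getElem?_set_self (by rw [ih1]; omega)]
      simpa using hk2

lemma pv_cpf_correct (p : List Char) :
    ∀ q, q < p.length → (compute_prefix_function p).getD q 0 = pvLbf p (q + 1) := by
  intro q hq
  obtain ⟨_, _, h3⟩ := pv_cpf_inv p (p.length - 1) le_rfl
  exact h3 q (by omega)

lemma pv_inner_inl (p : List Char) (piL : List Nat) (copy : Nat) (r : Int) :
    ∀ t : List Char, t.foldl (pvKmpStep p piL copy) (.inl r) = .inl r := by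
  intro t; induction t with
  | nil => rfl
  | cons c t ih => simpa [pvKmpStep] using ih

lemma pv_inner_notfound (p : List Char) (piL : List Nat) (copy : Nat) (hp : p ≠ [])
    (Hpi : ∀ j, j < p.length → piL.getD j 0 = pvLbf p (j + 1)) :
    ∀ (t w : List Char), pvLbp p w < p.length →
    (∀ j, j < t.length → ¬ p <:+ w ++ t.take (j + 1)) →
    t.foldl (pvKmpStep p piL copy) (.inr (pvLbp p w)) = .inr (pvLbp p (w ++ t)) := by
  intro t
  induction t with
  | nil => intro w _ _; simp
  | cons c t ih =>
    intro w hw hno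
    have hstep : pvKmpStep p piL copy (.inr (pvLbp p w)) c = .inr (pvLbp p (w ++ [c])) := by
      have h2 := pvStep_lbp p piL c w (pvLbp p w) rfl hw (Hpi)
      have hne : pvLbp p (w ++ [c]) ≠ p.length := by
        intro hm
        exact hno 0 (by simp) (by simpa using (pv_lbp_eq_len_iff p (w ++ [c]) hp).mp hm)
      show (if _ = p.length then _ else _) = _
      rw [h2, if_neg hne]
    rw [List.foldl_cons, hstep]
    have hw' : pvLbp p (w ++ [c]) < p.length :=
      lt_of_le_of_ne (pv_lbp_le p (w ++ [c])) (by
        intro hm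
        exact hno 0 (by simp) (by simpa using (pv_lbp_eq_len_iff p (w ++ [c]) hp).mp hm))
    have hres := ih (w ++ [c]) hw' (by
      intro j hj hsuf
      apply hno (j + 1) (by simpa using hj)
      rw [List.take_succ_cons, List.append_cons]
      exact hsuf)
    rw [List.append_cons w c t]
    exact hres

lemma pv_inner_found (p : List Char) (piL : List Nat) (copy : Nat) (hp : p ≠ [])
    (Hpi : ∀ j, j < p.length → piL.getD j 0 = pvLbf p (j + 1)) :
    ∀ (t w : List Char), pvLbp p w < p.length →
    (∃ j, j < t.length ∧ p <:+ w ++ t.take (j + 1)) →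
    t.foldl (pvKmpStep p piL copy) (.inr (pvLbp p w)) = .inl ((copy + 1 : Nat) : Int) := by
  intro t
  induction t with
  | nil => rintro w _ ⟨j, hj, _⟩; simp at hj
  | cons c t ih =>
    intro w hw hex
    have h2 := pvStep_lbp p piL c w (pvLbp p w) rfl hw (Hpi)
    by_cases hm : pvLbp p (w ++ [c]) = p.length
    · have hstep : pvKmpStep p piL copy (.inr (pvLbp p w)) c = .inl ((copy + 1 : Nat) : Int) := by
        show (if _ = p.length then _ else _) = _
        rw [h2, if_pos hm]
      rw [List.foldl_cons, hstep, pv_inner_inl]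
    · have hstep : pvKmpStep p piL copy (.inr (pvLbp p w)) c = .inr (pvLbp p (w ++ [c])) := by
        show (if _ = p.length then _ else _) = _
        rw [h2, if_neg hm]
      rw [List.foldl_cons, hstep]
      have hw' : pvLbp p (w ++ [c]) < p.length :=
        lt_of_le_of_ne (pv_lbp_le p (w ++ [c])) hm
      obtain ⟨j, hj, hsuf⟩ := hex
      rcases j with _ | j
      · exfalso
        exact hm ((pv_lbp_eq_len_iff p (w ++ [c]) hp).mpr (by simpa using hsuf))
      · refine ih (w ++ [c]) hw' ⟨j, by simpa using hj, ?_⟩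
        rw [List.take_succ_cons, List.append_cons] at hsuf
        exact hsuf

lemma pv_outer_inl (p : List Char) (piL : List Nat) (t : List Char) (r : Int) :
    ∀ (L : List Nat), L.foldl (fun st copy => t.foldl (pvKmpStep p piL copy) st) (.inl r) =
      .inl r := by
  intro L
  induction L with
  | nil => rfl
  | cons a L ih => simp only [List.foldl_cons, pv_inner_inl]; exact ih

-- find? over a range returns the FIRST hit: everything strictly before it fails
lemma pv_find?_range_first (N : Nat) (f : Nat → Bool) (j₀ : Nat)
    (h : (List.range N).find? f = some j₀) : ∀ j, j < j₀ → ¬ f j = true := by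
  intro j hj
  obtain ⟨-, as, bs, hsplit, hfail⟩ := List.find?_eq_some_iff_append.mp h
  have hlen : as.length < N := by
    have hc := congrArg List.length hsplit
    simp at hc
    omega
  have htake : as = List.range as.length := by
    have h1 : (as ++ j₀ :: bs).take as.length = as := by
      rw [List.take_append_of_le_length le_rfl, List.take_length]
    rw [← hsplit, List.take_range, Nat.min_eq_left (le_of_lt hlen)] at h1
    exact h1.symm
  have hdrop : List.range' as.length (N - as.length) = j₀ :: bs := by
    have h1 : (as ++ j₀ :: bs).drop as.length = j₀ :: bs := List.drop_left
    rw [← hsplit, List.range_eq_range', List.drop_range'] at h1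
    simpa using h1
  have hj₀ : j₀ = as.length := by
    rcases Nat.exists_eq_succ_of_ne_zero (show N - as.length ≠ 0 from by omega) with ⟨k, hk⟩
    rw [hk, List.range'_succ] at hdrop
    injection hdrop with h1 _
    exact h1.symm
  have hmem : j ∈ as := by
    rw [htake]
    exact List.mem_range.mpr (by omega)
  simpa using hfail j hmem

-- find? congruence for pointwise-equal predicates
lemma pv_find?_congr {α : Type} (f g : α → Bool) :
    ∀ l : List α, (∀ x ∈ l, f x = g x) → l.find? f = l.find? g := by
  intro l
  induction l with
  | nil => intro _; rfl
  | cons a l ih =>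
    intro h
    rw [List.find?_cons, List.find?_cons, h a (List.mem_cons_self),
      ih (fun x hx => h x (List.mem_cons_of_mem a hx))]

lemma pv_outer_run (p : List Char) (piL : List Nat) (t : List Char) (hp : p ≠ [])
    (ht : t ≠ []) (Hpi : ∀ j, j < p.length → piL.getD j 0 = pvLbf p (j + 1)) :
    ∀ r c (w : List Char), pvLbp p w < p.length →
    (List.range' c r).foldl (fun st copy => t.foldl (pvKmpStep p piL copy) st)
        (.inr (pvLbp p w)) =
      match (List.range (r * t.length)).find?
          (fun j => decide (p <:+ w ++ ((List.replicate r t).flatten).take (j + 1))) with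
      | some j => .inl ((c + j / t.length + 1 : Nat) : Int)
      | none => .inr (pvLbp p (w ++ (List.replicate r t).flatten)) := by
  intro r
  induction r with
  | zero => intro c w hw; simp
  | succ r ih =>
    intro c w hw
    have hn : 0 < t.length := List.length_pos_of_ne_nil ht
    have hflat : (List.replicate (r + 1) t).flatten = t ++ (List.replicate r t).flatten := by
      simp [List.replicate_succ]
    rw [List.range'_succ, List.foldl_cons]
    by_cases hex : ∃ j, j < t.length ∧ p <:+ w ++ t.take (j + 1)
    · rw [pv_inner_found p piL c hp Hpi t w hw hex, pv_outer_inl]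
      -- the first occurrence end is inside copy 0
      have hsome : ∃ j₀, (List.range ((r + 1) * t.length)).find?
          (fun j => decide (p <:+ w ++ ((List.replicate (r + 1) t).flatten).take (j + 1)))
            = some j₀ := by
        apply Option.isSome_iff_exists.mp
        apply List.find?_isSome.mpr
        obtain ⟨j, hj, hsuf⟩ := hex
        refine ⟨j, List.mem_range.mpr ?_, ?_⟩
        · calc j < t.length := hj
            _ ≤ (r + 1) * t.length := Nat.le_mul_of_pos_left _ (by omega)
        · rw [hflat, List.take_append_of_le_length (by omega)]
          simpa using hsuf
      obtain ⟨j₀, hj₀⟩ := hsome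
      rw [hj₀]
      have hj₀n : j₀ < t.length := by
        by_contra hge
        push_neg at hge
        have := List.find?_some hj₀
        simp only [decide_eq_true_eq] at this
        -- j₀ would be the FIRST hit, but some j < t.length already hits: contradiction
        obtain ⟨j, hj, hsuf⟩ := hex
        have hlt : j < j₀ := lt_of_lt_of_le hj hge
        have := pv_find?_range_first _ _ _ hj₀ j hlt
        simp only [decide_eq_true_eq] at this
        apply this
        rw [hflat, List.take_append_of_le_length (by omega)]
        simpa using hsuf
      show Sum.inl ((c + 1 : Nat) : Int) = Sum.inl ((c + j₀ / t.length + 1 : Nat) : Int)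
      rw [Nat.div_eq_of_lt hj₀n]
    · push_neg at hex
      have hno : ∀ j, j < t.length → ¬ p <:+ w ++ t.take (j + 1) := fun j hj => hex j hj
      rw [pv_inner_notfound p piL c hp Hpi t w hw hno]
      have hwt : pvLbp p (w ++ t) < p.length := by
        apply lt_of_le_of_ne (pv_lbp_le p (w ++ t))
        intro hm
        apply hno (t.length - 1) (by omega)
        rw [show t.length - 1 + 1 = t.length from by omega, List.take_length]
        exact (pv_lbp_eq_len_iff p (w ++ t) hp).mp hm
      have hIH := ih (c + 1) (w ++ t) hwt
      rw [hIH]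
      -- align the two find? computations
      have hsplit : (r + 1) * t.length = t.length + r * t.length := by ring
      rw [hsplit, List.range_add, List.find?_append]
      have hfirst : (List.range t.length).find?
          (fun j => decide (p <:+ w ++ ((List.replicate (r + 1) t).flatten).take (j + 1))) = none := by
        apply List.find?_eq_none.mpr
        intro j hj
        simp only [decide_eq_true_eq]
        rw [hflat, List.take_append_of_le_length (by simpa using List.mem_range.mp hj)]
        exact hno j (List.mem_range.mp hj)
      rw [hfirst, Option.none_or, List.find?_map]
      have hcomp : ∀ j : Nat,
          ((fun j => decide (p <:+ w ++ ((List.replicate (r + 1) t).flatten).take (j + 1))) ∘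
            (t.length + ·)) j
          = (fun j => decide (p <:+ (w ++ t) ++ ((List.replicate r t).flatten).take (j + 1))) j := by
        intro j
        simp only [Function.comp_apply, decide_eq_decide]
        rw [hflat, show t.length + j + 1 = t.length + (j + 1) from by omega,
          List.take_length_add_append, ← List.append_assoc]
      rw [pv_find?_congr _ _ _ (fun x _ => hcomp x)]
      cases hfind : (List.range (r * t.length)).find?
          (fun j => decide (p <:+ (w ++ t) ++ ((List.replicate r t).flatten).take (j + 1))) with
      | none => simp [hflat, List.append_assoc]
      | some j' =>
        simp only [Option.map_some]
        have : (c + 1) + j' / t.length + 1 = c + (t.length + j') / t.length + 1 := by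
          rw [show t.length + j' = j' + t.length from by omega, Nat.add_div_right _ hn]
          omega
        rw [this]

lemma pv_scanB_char (s p : List Char) (n : Nat) :
    ∀ l : List Nat, pvScanB s p n l =
      match l.find? (fun e => decide ((s.drop (e + 1 - p.length)).take p.length = p)) with
      | some e => ((e / n : Nat) : Int) + 1
      | none => -1 := by
  intro l; induction l with
  | nil => rfl
  | cons e es ih =>
    by_cases h : (s.drop (e + 1 - p.length)).take p.length = p
    · simp [pvScanB, h, List.find?]
    · simp [pvScanB, h, List.find?, ih]

lemma pv_len_flatten (r : Nat) (t : List Char) :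
    ((List.replicate r t).flatten).length = r * t.length := by
  simp

-- ===== VERDICT (by name: the statement is the Claim_ definition above) =====
theorem kmp_matcher_modified_spec : Claim_equal_kmp_matcher_modified := by
  intro T P _ hpre
  obtain ⟨hT, hP⟩ := hpre
  unfold Spec_kmp_matcher_modified
  simp only [kmp_matcher_modified, kmp_matcher_modified_alt]
  set t := T.toList with ht
  set p := P.toList with hp
  have hn : 0 < t.length := List.length_pos_of_ne_nil hT
  have hm : 0 < p.length := List.length_pos_of_ne_nil hP
  set rep := 2 + p.length / t.length with hrep
  set s := (List.replicate rep t).flatten with hs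
  have hslen : s.length = rep * t.length := pv_len_flatten rep t
  have hw0 : pvLbp p [] < p.length := by rw [pv_lbp_nil p hP]; exact hm
  have houter := pv_outer_run p (compute_prefix_function p) t hP hT (pv_cpf_correct p)
    rep 0 [] hw0
  rw [pv_lbp_nil p hP] at houter
  rw [List.range_eq_range', houter]
  rw [pv_scanB_char]
  -- split A's index range at m - 1; the first m - 1 positions cannot end a match
  have hdm := Nat.div_add_mod p.length t.length
  have hmod := Nat.mod_lt p.length hn
  have hKle : p.length - 1 ≤ rep * t.length := by
    have h1 := Nat.div_add_mod p.length t.length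
    rw [Nat.mul_comm] at h1
    have h2 : rep * t.length = 2 * t.length + (p.length / t.length) * t.length := by
      rw [hrep]; ring
    omega
  have hsplit : rep * t.length = (p.length - 1) + (rep * t.length - (p.length - 1)) := by
    omega
  rw [hsplit, List.range_add, List.find?_append]
  have hfirst : (List.range (p.length - 1)).find?
      (fun j => decide (p <:+ [] ++ s.take (j + 1))) = none := by
    apply List.find?_eq_none.mpr
    intro j hj
    simp only [List.nil_append, decide_eq_true_eq]
    intro hsuf
    have hle := List.IsSuffix.length_le hsuf
    rw [List.length_take] at hle
    have hjm : j < p.length - 1 := List.mem_range.mp hj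
    omega
  rw [hfirst, Option.none_or, List.find?_map, List.range'_eq_map_range, List.find?_map,
    Nat.add_sub_cancel_left]
  have hcomp : ∀ j ∈ List.range (rep * t.length - (p.length - 1)),
      ((fun j => decide (p <:+ [] ++ s.take (j + 1))) ∘ (p.length - 1 + ·)) j
        = ((fun e => decide ((s.drop (e + 1 - p.length)).take p.length = p)) ∘
            (fun i => p.length - 1 + i)) j := by
    intro j hj
    have hjlt : j < rep * t.length - (p.length - 1) := List.mem_range.mp hj
    have he1 : p.length ≤ (p.length - 1 + j) + 1 := by omega
    have he2 : (p.length - 1 + j) + 1 ≤ s.length := by rw [hslen]; omega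
    simp only [Function.comp_apply, List.nil_append, decide_eq_decide]
    have hlt : (s.take ((p.length - 1 + j) + 1)).length = (p.length - 1 + j) + 1 := by
      rw [List.length_take]; omega
    rw [pv_suffix_iff_drop p (s.take ((p.length - 1 + j) + 1)) (by omega), hlt,
      List.drop_take,
      show (p.length - 1 + j) + 1 - ((p.length - 1 + j) + 1 - p.length) = p.length from by
        omega]
  rw [pv_find?_congr _ _ _ hcomp]
  cases hfind : (List.range (rep * t.length - (p.length - 1))).find?
      ((fun e => decide ((s.drop (e + 1 - p.length)).take p.length = p)) ∘
        (fun i => p.length - 1 + i)) with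
  | none => rfl
  | some j =>
    show ((0 + (p.length - 1 + j) / t.length + 1 : Nat) : Int)
      = (((p.length - 1 + j) / t.length : Nat) : Int) + 1
    push_cast
    ring
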